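-- pv_equiv track=rewrite | github.com/phulmuhmmad/deauthauto | web_converter.py | file_to_hex_array
-- ===== SOURCE A (Python) =====
-- def file_to_hex_array(file_content):
--     """Convert file content to hex byte array"""
--     hex_bytes = []
--     try:
--         encoded_content = file_content.encode('utf-8')
--     except UnicodeEncodeError:
--         encoded_content = file_content.encode('ascii', errors='ignore')
--
--     for byte in encoded_content:
--         hex_bytes.append(f"0x{byte:02x}")
--
--     return hex_bytes
-- ===== SOURCE B (Python) =====
-- def file_to_hex_array(file_content):
--     """Convert file content to hex byte array"""
--     try:
--         encoded_content = file_content.encode('utf-8')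
--     except UnicodeEncodeError:
--         encoded_content = file_content.encode('ascii', errors='ignore')
--     h = encoded_content.hex()
--     return ["0x" + h[i:i+2] for i in range(0, len(h), 2)]
-- ===== Notes on version B (the rewrite author's own statement) =====
-- stated objective: alternative
-- what changed: B computes the whole hex string once with bytes.hex() and then rebuilds the list by chunking it into two-character slices, instead of formatting each byte individually with an f-string inside the loop.
import Mathlib
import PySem

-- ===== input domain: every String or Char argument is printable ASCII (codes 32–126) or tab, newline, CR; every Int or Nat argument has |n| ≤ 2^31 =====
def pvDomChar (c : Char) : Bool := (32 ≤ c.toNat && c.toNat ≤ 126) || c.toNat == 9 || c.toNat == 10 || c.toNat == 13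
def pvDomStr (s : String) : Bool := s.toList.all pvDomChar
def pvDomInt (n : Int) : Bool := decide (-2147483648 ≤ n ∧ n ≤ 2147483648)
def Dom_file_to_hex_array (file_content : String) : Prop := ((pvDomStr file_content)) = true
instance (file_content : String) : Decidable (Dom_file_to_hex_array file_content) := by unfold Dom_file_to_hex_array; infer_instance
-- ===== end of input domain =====

-- B builds one concatenated hex string (bytes.hex()) and chunks it into 2-char slices,
-- instead of formatting each byte inside the loop; alternative decomposition, same cost.


-- shared tiny helper: one lowercase hex digit (exact for 0 ≤ n < 16)
def pvHexDigit (n : Nat) : Char := if n < 10 then Char.ofNat (48 + n) else Char.ofNat (87 + n)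

-- ===== PORT A =====
-- encode('utf-8') on the ASCII domain is the identity on byte values, so the byte loop
-- walks the char codes; each iteration appends f"0x{byte:02x}".
def file_to_hex_array (file_content : String) : List String :=
  file_content.toList.foldl
    (fun hex_bytes c =>
      hex_bytes ++ ["0x" ++ String.mk [pvHexDigit (c.toNat / 16), pvHexDigit (c.toNat % 16)]])
    []

-- ===== PORT B =====
-- h = encoded_content.hex(): the whole hex string at once
def pvHexStr (file_content : String) : List Char :=
  file_content.toList.flatMap (fun c => [pvHexDigit (c.toNat / 16), pvHexDigit (c.toNat % 16)])

-- the range(0, len(h), 2) loop taking slices h[i:i+2]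
def pvChunk : List Char → List String
  | a :: b :: rest => ("0x" ++ String.mk [a, b]) :: pvChunk rest
  | _ => []

def file_to_hex_array_alt (file_content : String) : List String :=
  pvChunk (pvHexStr file_content)

-- ===== PRECONDITION & SPEC =====
def Spec_file_to_hex_array (file_content : String) (out : List String) : Prop := out = file_to_hex_array_alt file_content
instance (file_content : String) (out : List String) : Decidable (Spec_file_to_hex_array file_content out) := by unfold Spec_file_to_hex_array; infer_instance

-- ===== CLAIM (what is proved, stated in full; the proofs are below) =====
def Claim_equal_file_to_hex_array : Prop := ∀ (file_content : String), Dom_file_to_hex_array file_content → Spec_file_to_hex_array file_content (file_to_hex_array file_content)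

-- ===== LEMMAS AND PROOFS =====
def pvF (c : Char) : String := "0x" ++ String.mk [pvHexDigit (c.toNat / 16), pvHexDigit (c.toNat % 16)]

theorem pv_foldl_map (l : List Char) (acc : List String) :
    l.foldl (fun hex_bytes c => hex_bytes ++ [pvF c]) acc = acc ++ l.map pvF := by
  induction l generalizing acc with
  | nil => simp
  | cons c t ih => simp [List.foldl, ih]

theorem pv_chunk_flatMap (l : List Char) :
    pvChunk (l.flatMap (fun c => [pvHexDigit (c.toNat / 16), pvHexDigit (c.toNat % 16)])) = l.map pvF := by
  induction l with
  | nil => simp [pvChunk]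
  | cons c t ih => simp [List.flatMap_cons, pvChunk, ih, pvF]

-- ===== VERDICT (by name: the statement is the Claim_ definition above) =====
theorem file_to_hex_array_spec : Claim_equal_file_to_hex_array := by
  intro s _
  show _ = _
  rw [file_to_hex_array, file_to_hex_array_alt, pvHexStr, pv_chunk_flatMap]
  exact pv_foldl_map s.toList []
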